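-- pv_equiv track=rewrite | github.com/eshwanthkartitr/litecode | 929-groups-of-special-equivalent-strings/groups-of-special-equivalent-strings.py | numSpecialEquivGroups
-- ===== SOURCE A (Python) =====
-- from typing import List
--
-- def numSpecialEquivGroups(words: List[str]) -> int:
--     result={}
--     for i in range(len(words)):
--         cur1 = words[i]
--         eve1 = []
--         odd1 = []
--         for k in range(len(cur1)):
--             if k%2 == 0:
--                 eve1.append(cur1[k])
--             else:
--                 odd1.append(cur1[k])
--         eve1.sort()
--         odd1.sort()
--         if (tuple(eve1),tuple(odd1)) in result:
--             result[(tuple(eve1),tuple(odd1))].append(cur1)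
--         else:
--             result[(tuple(eve1),tuple(odd1))] = [cur1]
--     return len(result.keys())
-- ===== SOURCE B (Python) =====
-- def numSpecialEquivGroups(words):
--     # One pass per word: frequency-count vectors (per index parity) collected in a
--     # set of signatures, instead of sorting the two character lists and grouping in a dict.
--     def sig(w):
--         ec = [0] * 128
--         oc = [0] * 128
--         for i, c in enumerate(w):
--             if i % 2 == 0:
--                 ec[ord(c)] += 1
--             else:
--                 oc[ord(c)] += 1
--         return tuple(ec) + tuple(oc)
--     return len({sig(w) for w in words})
-- ===== Notes on version B (the rewrite author's own statement) =====
-- stated objective: alternative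
-- what changed: B replaces A's sort-the-even/odd-characters key and dict of groups by an ASCII frequency-count vector per index parity collected into a set of signatures; no sorting and no group lists are maintained.
import Mathlib
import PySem

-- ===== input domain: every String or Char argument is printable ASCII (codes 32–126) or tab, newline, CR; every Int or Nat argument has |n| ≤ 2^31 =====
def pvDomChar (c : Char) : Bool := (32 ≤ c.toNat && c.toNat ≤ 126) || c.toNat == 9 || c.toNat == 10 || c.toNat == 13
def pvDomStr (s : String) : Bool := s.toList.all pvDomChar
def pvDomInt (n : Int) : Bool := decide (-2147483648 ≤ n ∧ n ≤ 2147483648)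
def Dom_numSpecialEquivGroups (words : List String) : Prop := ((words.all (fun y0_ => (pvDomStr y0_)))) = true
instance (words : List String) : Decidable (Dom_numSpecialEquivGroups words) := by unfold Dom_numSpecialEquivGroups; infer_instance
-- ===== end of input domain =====

-- B replaces A's sorted-character signatures and dict of groups by per-parity
-- ASCII frequency-count signatures collected in a set (alternative algorithm, similar cost).

-- ===== PORT A =====
-- body of A's outer loop: split cur1 (= words[i]) by index parity, sort both lists, group
-- (cur1[k], a 1-char string, is ported as the char at index k)
def aStep (result : PySem.Dict (List Char × List Char) (List String)) (cur1 : String) :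
    PySem.Dict (List Char × List Char) (List String) :=
  let eo := (PySem.List.pyRange 0 (PySem.Str.len cur1) 1).foldl
    (fun (p : List Char × List Char) k =>
      if PySem.Int.mod k 2 = 0 then (p.1 ++ [PySem.List.pyGetD cur1.toList k ' '], p.2)
      else (p.1, p.2 ++ [PySem.List.pyGetD cur1.toList k ' ']))
    ([], [])
  let eve1 := PySem.List.sorted eo.1 (fun c => c) false
  let odd1 := PySem.List.sorted eo.2 (fun c => c) false
  if result.contains (eve1, odd1) then
    result.modify (eve1, odd1) [] (fun l => l ++ [cur1])   -- result[key].append(cur1)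
  else
    result.insert (eve1, odd1) [cur1]

def numSpecialEquivGroups (words : List String) : Int :=
  -- result = {} ; for i in range(len(words)): process cur1 = words[i]
  let result : PySem.Dict (List Char × List Char) (List String) := PySem.Dict.empty
  let result := (PySem.List.pyRange 0 (PySem.List.len words) 1).foldl
    (fun result i => aStep result (PySem.List.pyGetD words i "")) result
  (result.keys.length : Int)

-- ===== PORT B =====
-- ec[ord(c)] += 1  (oc likewise)
def pvBump (v : List Int) (c : Char) : List Int :=
  PySem.List.pySetD v (c.toNat : Int) (PySem.List.pyGetD v (c.toNat : Int) 0 + 1)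

-- sig(w): one pass over enumerate(w); [0]*128 is pyRepeat; tuple(ec)+tuple(oc) is append
def pvSig (cs : List Char) : List Int :=
  let ec := PySem.List.pyRepeat [(0 : Int)] 128
  let oc := PySem.List.pyRepeat [(0 : Int)] 128
  let eo := (PySem.List.enumerate cs).foldl
    (fun (p : List Int × List Int) q =>
      if PySem.Int.mod q.1 2 = 0 then (pvBump p.1 q.2, p.2) else (p.1, pvBump p.2 q.2))
    (ec, oc)
  eo.1 ++ eo.2

def numSpecialEquivGroups_alt (words : List String) : Int :=
  ((PySem.Set.ofList (words.map (fun w => pvSig w.toList))).length : Int)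

-- ===== PRECONDITION & SPEC =====
def Spec_numSpecialEquivGroups (words : List String) (out : Int) : Prop := out = numSpecialEquivGroups_alt words
instance (words : List String) (out : Int) : Decidable (Spec_numSpecialEquivGroups words out) := by unfold Spec_numSpecialEquivGroups; infer_instance

-- ===== CLAIM (what is proved, stated in full; the proofs are below) =====
def Claim_equal_numSpecialEquivGroups : Prop := ∀ (words : List String), Dom_numSpecialEquivGroups words → Spec_numSpecialEquivGroups words (numSpecialEquivGroups words)

-- ===== LEMMAS AND PROOFS =====

-- chars at even / odd indices
def pvSplit : List Char → List Char × List Char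
  | [] => ([], [])
  | c :: t => (c :: (pvSplit t).2, (pvSplit t).1)

-- A's per-word key: the two sorted parity classes
def pvKeyA (cs : List Char) : List Char × List Char :=
  (PySem.List.sorted (pvSplit cs).1 (fun c => c) false,
   PySem.List.sorted (pvSplit cs).2 (fun c => c) false)

lemma mem_pvSplit (cs : List Char) (x : Char)
    (h : x ∈ (pvSplit cs).1 ∨ x ∈ (pvSplit cs).2) : x ∈ cs := by
  induction cs with
  | nil => simp [pvSplit] at h
  | cons c t ih =>
    simp only [pvSplit] at h
    rcases h with h | h
    · rcases List.mem_cons.mp h with h | h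
      · simp [h]
      · exact List.mem_cons_of_mem _ (ih (Or.inr h))
    · exact List.mem_cons_of_mem _ (ih (Or.inl h))

-- A's inner loop over enumerate, with arbitrary start parity
lemma foldSplit (cs : List Char) : ∀ (s : Int) (e o : List Char), 0 ≤ s →
    (PySem.List.enumerate cs s).foldl
      (fun (p : List Char × List Char) q =>
        if PySem.Int.mod q.1 2 = 0 then (p.1 ++ [q.2], p.2) else (p.1, p.2 ++ [q.2]))
      (e, o)
    = if PySem.Int.mod s 2 = 0 then (e ++ (pvSplit cs).1, o ++ (pvSplit cs).2)
      else (e ++ (pvSplit cs).2, o ++ (pvSplit cs).1) := by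
  induction cs with
  | nil =>
    intro s e o _
    simp [PySem.List.enumerate_nil, pvSplit]
  | cons c t ih =>
    intro s e o hs
    rw [PySem.List.enumerate_cons, List.foldl_cons]
    have hm : PySem.Int.mod s 2 = s % 2 := PySem.Int.mod_eq_emod_of_pos (by norm_num)
    have hm1 : PySem.Int.mod (s + 1) 2 = (s + 1) % 2 := PySem.Int.mod_eq_emod_of_pos (by norm_num)
    by_cases hp : PySem.Int.mod s 2 = 0
    · have h1 : ¬ PySem.Int.mod (s + 1) 2 = 0 := by rw [hm1]; rw [hm] at hp; omega
      rw [if_pos hp, if_pos hp, ih (s + 1) (e ++ [c]) o (by omega), if_neg h1]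
      simp [pvSplit]
    · have h1 : PySem.Int.mod (s + 1) 2 = 0 := by rw [hm1]; rw [hm] at hp; omega
      rw [if_neg hp, if_neg hp, ih (s + 1) e (o ++ [c]) (by omega), if_pos h1]
      simp [pvSplit]

lemma mod_zero_two : PySem.Int.mod 0 2 = 0 := by decide

-- pvBump applied along a list
def pvAddCnt (v : List Int) (l : List Char) : List Int := l.foldl pvBump v

lemma pvAddCnt_length (l : List Char) : ∀ v : List Int, (pvAddCnt v l).length = v.length := by
  induction l with
  | nil => intro v; rfl
  | cons c t ih =>
    intro v
    show (pvAddCnt (pvBump v c) t).length = v.length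
    rw [ih (pvBump v c)]
    simp [pvBump, PySem.List.pySetD_natCast]

lemma pvBump_getD (v : List Int) (c : Char) (j : Nat) :
    (pvBump v c).getD j 0 = if j = c.toNat ∧ c.toNat < v.length
      then v.getD j 0 + 1 else v.getD j 0 := by
  simp only [pvBump, PySem.List.pySetD_natCast, PySem.List.pyGetD_natCast]
  rcases Nat.lt_or_ge c.toNat v.length with hlt | hge
  · by_cases hj : j = c.toNat
    · subst hj
      rw [if_pos ⟨rfl, hlt⟩]
      simp [List.getD_eq_getElem?_getD, hlt]
    · rw [if_neg (fun h => hj h.1)]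
      simp [List.getD_eq_getElem?_getD, List.getElem?_set_ne (fun h => hj h.symm)]
  · rw [List.set_eq_of_length_le hge, if_neg (fun h => absurd h.2 (Nat.not_lt.mpr hge))]

lemma char_toNat_ofNat (j : Nat) (h : j < 128) : (Char.ofNat j).toNat = j := by
  unfold Char.ofNat
  rw [dif_pos (by constructor; omega)]
  simp [Char.toNat, Char.ofNatAux]

lemma pvAddCnt_getD (l : List Char) (h128 : ∀ c ∈ l, c.toNat < 128) :
    ∀ v : List Int, v.length = 128 → ∀ j : Nat, j < 128 →
    (pvAddCnt v l).getD j 0 = v.getD j 0 + (l.count (Char.ofNat j) : Int) := by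
  induction l with
  | nil => intro v _ j _; simp [pvAddCnt]
  | cons c t ih =>
    intro v hv j hj
    have hc : c.toNat < 128 := h128 c (by simp)
    have ht : ∀ x ∈ t, x.toNat < 128 := fun x hx => h128 x (List.mem_cons_of_mem _ hx)
    show (pvAddCnt (pvBump v c) t).getD j 0 = _
    rw [ih ht (pvBump v c) (by simp [pvBump, PySem.List.pySetD_natCast]; omega) j hj,
      pvBump_getD]
    have hcj : c = Char.ofNat j ↔ j = c.toNat := by
      constructor
      · intro h; subst h; exact (char_toNat_ofNat j hj).symm
      · intro h; subst h; exact (Char.ofNat_toNat c).symm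
    by_cases hjc : j = c.toNat
    · rw [if_pos ⟨hjc, by omega⟩, List.count_cons, if_pos (beq_iff_eq.mpr (hcj.mpr hjc))]
      push_cast
      ring
    · rw [if_neg (fun h => hjc h.1), List.count_cons,
        if_neg (by simp [beq_iff_eq]; exact fun h => hjc (hcj.mp h))]
      simp

lemma pvZero_getD (j : Nat) : (PySem.List.pyRepeat [(0 : Int)] 128).getD j 0 = 0 := by
  rw [PySem.List.pyRepeat_singleton, List.getD_eq_getElem?_getD, List.getElem?_replicate]
  split <;> simp

-- B's inner loop over enumerate, with arbitrary start parity
lemma foldCnt (cs : List Char) : ∀ (s : Int) (e o : List Int), 0 ≤ s →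
    (PySem.List.enumerate cs s).foldl
      (fun (p : List Int × List Int) q =>
        if PySem.Int.mod q.1 2 = 0 then (pvBump p.1 q.2, p.2) else (p.1, pvBump p.2 q.2))
      (e, o)
    = if PySem.Int.mod s 2 = 0 then (pvAddCnt e (pvSplit cs).1, pvAddCnt o (pvSplit cs).2)
      else (pvAddCnt e (pvSplit cs).2, pvAddCnt o (pvSplit cs).1) := by
  induction cs with
  | nil =>
    intro s e o _
    simp [PySem.List.enumerate_nil, pvSplit, pvAddCnt]
  | cons c t ih =>
    intro s e o hs
    rw [PySem.List.enumerate_cons, List.foldl_cons]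
    have hm : PySem.Int.mod s 2 = s % 2 := PySem.Int.mod_eq_emod_of_pos (by norm_num)
    have hm1 : PySem.Int.mod (s + 1) 2 = (s + 1) % 2 := PySem.Int.mod_eq_emod_of_pos (by norm_num)
    by_cases hp : PySem.Int.mod s 2 = 0
    · have h1 : ¬ PySem.Int.mod (s + 1) 2 = 0 := by rw [hm1]; rw [hm] at hp; omega
      rw [if_pos hp, if_pos hp, ih (s + 1) (pvBump e c) o (by omega), if_neg h1]
      simp [pvSplit, pvAddCnt]
    · have h1 : PySem.Int.mod (s + 1) 2 = 0 := by rw [hm1]; rw [hm] at hp; omega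
      rw [if_neg hp, if_neg hp, ih (s + 1) e (pvBump o c) (by omega), if_pos h1]
      simp [pvSplit, pvAddCnt]

-- per-word signature in closed form
lemma pvSig_eq (cs : List Char) :
    pvSig cs = pvAddCnt (PySem.List.pyRepeat [(0 : Int)] 128) (pvSplit cs).1
      ++ pvAddCnt (PySem.List.pyRepeat [(0 : Int)] 128) (pvSplit cs).2 := by
  show ((PySem.List.enumerate cs).foldl
      (fun (p : List Int × List Int) q =>
        if PySem.Int.mod q.1 2 = 0 then (pvBump p.1 q.2, p.2) else (p.1, pvBump p.2 q.2))
      (PySem.List.pyRepeat [(0 : Int)] 128, PySem.List.pyRepeat [(0 : Int)] 128)).1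
    ++ ((PySem.List.enumerate cs).foldl
      (fun (p : List Int × List Int) q =>
        if PySem.Int.mod q.1 2 = 0 then (pvBump p.1 q.2, p.2) else (p.1, pvBump p.2 q.2))
      (PySem.List.pyRepeat [(0 : Int)] 128, PySem.List.pyRepeat [(0 : Int)] 128)).2 = _
  rw [foldCnt cs 0 _ _ le_rfl, if_pos mod_zero_two]

lemma pvRepeat_zero_length : (PySem.List.pyRepeat [(0 : Int)] 128).length = 128 := by
  rw [PySem.List.pyRepeat_singleton]; simp

-- the two signatures have the same kernel on Dom words
lemma vec_iff (l1 l2 : List Char)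
    (g1 : ∀ c ∈ l1, c.toNat < 128) (g2 : ∀ c ∈ l2, c.toNat < 128) :
    pvAddCnt (PySem.List.pyRepeat [(0 : Int)] 128) l1
      = pvAddCnt (PySem.List.pyRepeat [(0 : Int)] 128) l2 ↔ l1.Perm l2 := by
  constructor
  · intro h
    rw [List.perm_iff_count]
    intro c
    by_cases hmem : c ∈ l1 ∨ c ∈ l2
    · have hc : c.toNat < 128 := by
        rcases hmem with hm | hm
        · exact g1 c hm
        · exact g2 c hm
      have hgd := congrArg (fun v => v.getD c.toNat 0) h
      simp only at hgd
      rw [pvAddCnt_getD l1 g1 _ pvRepeat_zero_length c.toNat hc,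
          pvAddCnt_getD l2 g2 _ pvRepeat_zero_length c.toNat hc,
          Char.ofNat_toNat, pvZero_getD] at hgd
      simp only [zero_add] at hgd
      exact_mod_cast hgd
    · rw [List.count_eq_zero_of_not_mem (fun hm => hmem (Or.inl hm)),
         List.count_eq_zero_of_not_mem (fun hm => hmem (Or.inr hm))]
  · intro hperm
    apply List.ext_getElem
    · rw [pvAddCnt_length, pvAddCnt_length]
    · intro j hj1 hj2
      have hj : j < 128 := by
        rw [pvAddCnt_length, pvRepeat_zero_length] at hj1
        exact hj1
      rw [← List.getD_eq_getElem _ 0 hj1, ← List.getD_eq_getElem _ 0 hj2,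
        pvAddCnt_getD l1 g1 _ pvRepeat_zero_length j hj,
        pvAddCnt_getD l2 g2 _ pvRepeat_zero_length j hj,
        hperm.count_eq]

-- the two signatures have the same kernel on Dom words
lemma key_iff (cs1 cs2 : List Char)
    (h1 : ∀ c ∈ cs1, pvDomChar c = true) (h2 : ∀ c ∈ cs2, pvDomChar c = true) :
    pvKeyA cs1 = pvKeyA cs2 ↔ pvSig cs1 = pvSig cs2 := by
  have code_lt : ∀ c : Char, pvDomChar c = true → c.toNat < 128 := by
    intro c hc
    simp only [pvDomChar, Bool.or_eq_true, Bool.and_eq_true, decide_eq_true_eq,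
      beq_iff_eq] at hc
    omega
  have h1E : ∀ c ∈ (pvSplit cs1).1, c.toNat < 128 :=
    fun c hc => code_lt c (h1 c (mem_pvSplit cs1 c (Or.inl hc)))
  have h1O : ∀ c ∈ (pvSplit cs1).2, c.toNat < 128 :=
    fun c hc => code_lt c (h1 c (mem_pvSplit cs1 c (Or.inr hc)))
  have h2E : ∀ c ∈ (pvSplit cs2).1, c.toNat < 128 :=
    fun c hc => code_lt c (h2 c (mem_pvSplit cs2 c (Or.inl hc)))
  have h2O : ∀ c ∈ (pvSplit cs2).2, c.toNat < 128 :=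
    fun c hc => code_lt c (h2 c (mem_pvSplit cs2 c (Or.inr hc)))
  rw [pvSig_eq, pvSig_eq]
  constructor
  · intro h
    have hEp : (pvSplit cs1).1.Perm (pvSplit cs2).1 := by
      have := congrArg Prod.fst h
      simpa [pvKeyA, PySem.List.sorted_id_eq_sorted_id_iff_perm] using this
    have hOp : (pvSplit cs1).2.Perm (pvSplit cs2).2 := by
      have := congrArg Prod.snd h
      simpa [pvKeyA, PySem.List.sorted_id_eq_sorted_id_iff_perm] using this
    rw [(vec_iff _ _ h1E h2E).mpr hEp, (vec_iff _ _ h1O h2O).mpr hOp]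
  · intro h
    have hsplit := List.append_inj h (by rw [pvAddCnt_length, pvAddCnt_length])
    unfold pvKeyA
    rw [Prod.mk.injEq]
    exact ⟨(PySem.List.sorted_id_eq_sorted_id_iff_perm _ _).mpr
        ((vec_iff _ _ h1E h2E).mp hsplit.1),
      (PySem.List.sorted_id_eq_sorted_id_iff_perm _ _).mpr
        ((vec_iff _ _ h1O h2O).mp hsplit.2)⟩

lemma contains_iff_mem_keys {κ ν : Type} [BEq κ] [LawfulBEq κ]
    (d : PySem.Dict κ ν) (k : κ) : d.contains k = true ↔ k ∈ d.keys := by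
  constructor
  · intro h
    rcases List.any_eq_true.mp h with ⟨p, hp, he⟩
    exact List.mem_map.mpr ⟨p, hp, eq_of_beq he⟩
  · intro h
    rcases List.mem_map.mp h with ⟨p, hp, he⟩
    exact List.any_eq_true.mpr ⟨p, hp, beq_iff_eq.mpr he⟩

lemma keys_insert_of_contains {κ ν : Type} [BEq κ] [LawfulBEq κ]
    (d : PySem.Dict κ ν) (k : κ) (v : ν) (h : d.contains k = true) :
    (d.insert k v).keys = d.keys := by
  simp only [PySem.Dict.insert, h, if_true, PySem.Dict.keys, List.map_map]
  apply List.map_congr_left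
  intro p _
  by_cases hb : (p.1 == k) = true
  · simp only [Function.comp_apply, if_pos hb]
    exact (eq_of_beq hb).symm
  · simp only [Function.comp_apply, if_neg hb]

lemma keys_insert_of_not_contains {κ ν : Type} [BEq κ] [LawfulBEq κ]
    (d : PySem.Dict κ ν) (k : κ) (v : ν) (h : ¬ d.contains k = true) :
    (d.insert k v).keys = d.keys ++ [k] := by
  simp only [PySem.Dict.insert, h, if_false, PySem.Dict.keys, List.map_append, List.map_cons,
    List.map_nil, Bool.false_eq_true]

-- the keys of A's grouping fold are exactly the running set of keys
lemma dict_fold_keys {κ : Type} [BEq κ] [LawfulBEq κ] (key : String → κ) :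
    ∀ (ws : List String) (d : PySem.Dict κ (List String)),
    (ws.foldl (fun d w =>
        if d.contains (key w) then d.modify (key w) [] (fun l => l ++ [w])
        else d.insert (key w) [w]) d).keys
    = ws.foldl (fun s w => PySem.Set.add s (key w)) d.keys := by
  intro ws
  induction ws with
  | nil => intro d; rfl
  | cons w t ih =>
    intro d
    rw [List.foldl_cons, List.foldl_cons, ih]
    congr 1
    by_cases hc : d.contains (key w) = true
    · rw [if_pos hc, PySem.Dict.modify, keys_insert_of_contains _ _ _ ?_]
      · rw [PySem.Set.add_eq_ite, if_pos ((contains_iff_mem_keys d (key w)).mp hc)]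
      · exact hc
    · rw [if_neg hc, keys_insert_of_not_contains _ _ _ hc]
      rw [PySem.Set.add_eq_ite,
        if_neg (fun hm => hc ((contains_iff_mem_keys d (key w)).mpr hm))]

-- A computes the number of distinct pvKeyA signatures
lemma fold_eo (cs : List Char) :
    (PySem.List.pyRange 0 (PySem.List.len cs) 1).foldl
      (fun (p : List Char × List Char) k =>
        if PySem.Int.mod k 2 = 0 then (p.1 ++ [PySem.List.pyGetD cs k ' '], p.2)
        else (p.1, p.2 ++ [PySem.List.pyGetD cs k ' ']))
      ([], []) = pvSplit cs := by
  have h := foldSplit cs 0 [] [] le_rfl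
  rw [PySem.List.enumerate_eq_map_pyRange cs ' ', List.foldl_map] at h
  simpa [mod_zero_two] using h

lemma aStep_eq : aStep = (fun (result : PySem.Dict (List Char × List Char) (List String)) w =>
    if result.contains (pvKeyA w.toList) then
      result.modify (pvKeyA w.toList) [] (fun l => l ++ [w])
    else
      result.insert (pvKeyA w.toList) [w]) := by
  funext result w
  unfold aStep
  have hlen : PySem.Str.len w = PySem.List.len w.toList := by
    simp [PySem.Str.len_eq, PySem.List.len_eq]
  rw [hlen, fold_eo w.toList]
  rfl

lemma A_char (words : List String) :
    numSpecialEquivGroups words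
    = ((PySem.Set.ofList (words.map (fun w => pvKeyA w.toList))).length : Int) := by
  unfold numSpecialEquivGroups
  simp only [PySem.List.len_eq]
  rw [PySem.List.foldl_pyRange_zero_pyGetD' words "" aStep PySem.Dict.empty, aStep_eq,
    dict_fold_keys (fun w => pvKeyA w.toList) words PySem.Dict.empty]
  have hkeys : (PySem.Dict.empty : PySem.Dict (List Char × List Char) (List String)).keys
      = ([] : List (List Char × List Char)) := rfl
  rw [hkeys, ← PySem.Set.update_map_eq_foldl_add, PySem.Set.update_nil_left]

-- distinct-count is the same under keys with the same kernel
lemma ofList_map_length_congr {α β γ : Type} [BEq β] [LawfulBEq β] [BEq γ] [LawfulBEq γ]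
    (f : α → β) (g : α → γ) :
    ∀ l : List α, (∀ x ∈ l, ∀ y ∈ l, (f x = f y ↔ g x = g y)) →
    (PySem.Set.ofList (l.map f)).length = (PySem.Set.ofList (l.map g)).length := by
  intro l
  induction l using List.reverseRecOn with
  | nil => intro _; rfl
  | append_singleton t x ih =>
    intro h
    have ht : ∀ a ∈ t, ∀ b ∈ t, (f a = f b ↔ g a = g b) := by
      intro a ha b hb
      exact h a (List.mem_append_left _ ha) b (List.mem_append_left _ hb)
    rw [List.map_append, List.map_append, List.map_singleton, List.map_singleton,
      PySem.Set.ofList_append_singleton, PySem.Set.ofList_append_singleton,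
      PySem.Set.add_eq_ite, PySem.Set.add_eq_ite]
    have hmem : f x ∈ PySem.Set.ofList (t.map f) ↔ g x ∈ PySem.Set.ofList (t.map g) := by
      rw [PySem.Set.mem_ofList, PySem.Set.mem_ofList, List.mem_map, List.mem_map]
      constructor
      · rintro ⟨y, hy, he⟩
        exact ⟨y, hy, (h y (List.mem_append_left _ hy) x (by simp)).mp he⟩
      · rintro ⟨y, hy, he⟩
        exact ⟨y, hy, (h y (List.mem_append_left _ hy) x (by simp)).mpr he⟩
    by_cases hf : f x ∈ PySem.Set.ofList (t.map f)
    · rw [if_pos hf, if_pos (hmem.mp hf)]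
      exact ih ht
    · rw [if_neg hf, if_neg (fun hg => hf (hmem.mpr hg))]
      simp only [List.length_append, List.length_cons, List.length_nil]
      rw [ih ht]

-- ===== VERDICT (by name: the statement is the Claim_ definition above) =====
theorem numSpecialEquivGroups_spec : Claim_equal_numSpecialEquivGroups := by
  intro words hdom
  unfold Spec_numSpecialEquivGroups
  rw [A_char]
  unfold numSpecialEquivGroups_alt
  congr 1
  apply ofList_map_length_congr
  intro x hx y hy
  have hdx : ∀ c ∈ x.toList, pvDomChar c = true := by
    have := (List.all_eq_true.mp hdom) x hx
    exact fun c hc => List.all_eq_true.mp this c hc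
  have hdy : ∀ c ∈ y.toList, pvDomChar c = true := by
    have := (List.all_eq_true.mp hdom) y hy
    exact fun c hc => List.all_eq_true.mp this c hc
  exact key_iff x.toList y.toList hdx hdy
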